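-- pv_equiv track=rewrite | github.com/Jiggalag/silly-code | py_scripts/4Andrew.py | getUniqueDate
-- ===== SOURCE A (Python) =====
-- def getUniqueDate(fileList):
--     tmpDateList = []
--     for item in fileList:
--         tmpDateList.append(item[26:36])
--     uniqDates = []
--     for item in tmpDateList:
--         if item not in uniqDates:
--             uniqDates.append(item)
--     uniqDates.sort()
--     return uniqDates
-- ===== SOURCE B (Python) =====
-- def getUniqueDate(fileList):
--     out = []
--     for d in sorted(item[26:36] for item in fileList):
--         # sorted, so duplicates are adjacent: keep d only if it starts a new run
--         if not out or out[-1] != d: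
--             out.append(d)
--     return out
-- ===== Notes on version B (the rewrite author's own statement) =====
-- stated objective: simpler
-- what changed: Replaces A's quadratic seen-list membership dedup followed by a final sort with a sort-first pass that collapses adjacent duplicate runs in one loop.
import Mathlib
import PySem

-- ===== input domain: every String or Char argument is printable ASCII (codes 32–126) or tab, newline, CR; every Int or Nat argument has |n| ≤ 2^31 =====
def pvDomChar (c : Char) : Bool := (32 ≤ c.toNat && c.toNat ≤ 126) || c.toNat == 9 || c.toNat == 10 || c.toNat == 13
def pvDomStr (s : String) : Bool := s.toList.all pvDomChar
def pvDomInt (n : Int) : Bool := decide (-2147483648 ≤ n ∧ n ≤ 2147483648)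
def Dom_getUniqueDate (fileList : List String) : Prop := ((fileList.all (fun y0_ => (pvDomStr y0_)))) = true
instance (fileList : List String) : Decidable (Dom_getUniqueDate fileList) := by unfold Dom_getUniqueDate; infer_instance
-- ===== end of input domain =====

-- B sorts the substrings first and then collapses adjacent duplicate runs in one loop,
-- instead of A's seen-list membership dedup followed by a final sort (simpler).

-- ===== PORT A =====
def getUniqueDate (fileList : List String) : List String :=
  let tmpDateList := fileList.foldl (fun acc item => acc ++ [PySem.Str.slice item (some 26) (some 36)]) []
  let uniqDates := tmpDateList.foldl (fun acc item => if item ∈ acc then acc else acc ++ [item]) []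
  PySem.List.sorted uniqDates (fun x => x) false

-- ===== PORT B =====
def getUniqueDate_alt (fileList : List String) : List String :=
  (PySem.List.sorted (fileList.map (fun item => PySem.Str.slice item (some 26) (some 36))) (fun x => x) false).foldl
    (fun out d => if out = [] ∨ out.getLast? ≠ some d then out ++ [d] else out) []

-- ===== PRECONDITION & SPEC =====
def Spec_getUniqueDate (fileList : List String) (out : List String) : Prop := out = getUniqueDate_alt fileList
instance (fileList : List String) (out : List String) : Decidable (Spec_getUniqueDate fileList out) := by unfold Spec_getUniqueDate; infer_instance

-- ===== CLAIM (what is proved, stated in full; the proofs are below) =====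
def Claim_equal_getUniqueDate : Prop := ∀ (fileList : List String), Dom_getUniqueDate fileList → Spec_getUniqueDate fileList (getUniqueDate fileList)

-- ===== LEMMAS AND PROOFS =====

theorem le_getLast?_of_pairwise_lt : ∀ (acc : List String) (L : String), acc.Pairwise (· < ·) →
    acc.getLast? = some L → ∀ a ∈ acc, a ≤ L := by
  intro acc
  induction acc with
  | nil => intro L _ hL; simp at hL
  | cons a0 t ih =>
    intro L hp hL a ha
    cases t with
    | nil =>
      simp at hL ha
      simp [ha, hL]
    | cons a1 rest =>
      rw [List.getLast?_cons_cons] at hL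
      rcases List.mem_cons.mp ha with rfl | ha'
      · have h01 : a < a1 := List.rel_of_pairwise_cons hp (by simp)
        have h1L : a1 ≤ L := ih L hp.tail hL a1 (by simp)
        exact le_of_lt (lt_of_lt_of_le h01 h1L)
      · exact ih L hp.tail hL a ha'

theorem collapse_fold_inv (l : List String) : ∀ (acc : List String),
    l.Pairwise (· ≤ ·) → acc.Pairwise (· < ·) → (∀ a ∈ acc, ∀ b ∈ l, a ≤ b) →
    (∀ x, x ∈ l.foldl (fun out d => if out = [] ∨ out.getLast? ≠ some d then out ++ [d] else out) acc
        ↔ x ∈ acc ∨ x ∈ l) ∧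
    (l.foldl (fun out d => if out = [] ∨ out.getLast? ≠ some d then out ++ [d] else out) acc).Pairwise (· < ·) := by
  induction l with
  | nil => intro acc _ hacc _; simpa using hacc
  | cons d t ih =>
    intro acc hl hacc hsep
    simp only [List.foldl_cons]
    split_ifs with hcond
    · -- append d
      have hdt : ∀ b ∈ t, d ≤ b := fun b hb => List.rel_of_pairwise_cons hl hb
      have hlt : ∀ a ∈ acc, a < d := by
        intro a ha
        rcases hcond with hnil | hne
        · subst hnil; simp at ha
        · cases hL : acc.getLast? with
          | none =>
            rw [List.getLast?_eq_none_iff] at hL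
            subst hL; simp at ha
          | some L =>
            have haL : a ≤ L := le_getLast?_of_pairwise_lt acc L hacc hL a ha
            have hLd : L ≤ d := hsep L (List.mem_of_getLast? hL) d (by simp)
            have : L ≠ d := by
              intro he; rw [hL, he] at hne; exact hne rfl
            exact lt_of_le_of_lt haL (lt_of_le_of_ne hLd this)
      have hacc' : (acc ++ [d]).Pairwise (· < ·) := by
        rw [List.pairwise_append]
        exact ⟨hacc, List.pairwise_singleton _ _, fun a ha b hb => (List.mem_singleton.mp hb) ▸ hlt a ha⟩
      have hsep' : ∀ a ∈ acc ++ [d], ∀ b ∈ t, a ≤ b := by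
        intro a ha b hb
        rcases List.mem_append.mp ha with ha' | ha'
        · exact hsep a ha' b (by simp [hb])
        · exact (List.mem_singleton.mp ha') ▸ hdt b hb
      obtain ⟨hm, hp⟩ := ih (acc ++ [d]) hl.tail hacc' hsep'
      refine ⟨?_, hp⟩
      intro x
      rw [hm]
      simp [or_assoc]
    · -- skip d: d is the last element of acc, so d ∈ acc
      have hL : acc.getLast? = some d := by
        by_contra hne
        exact hcond (Or.inr hne)
      have hdacc : d ∈ acc := List.mem_of_getLast? hL
      have hsep' : ∀ a ∈ acc, ∀ b ∈ t, a ≤ b := fun a ha b hb => hsep a ha b (by simp [hb])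
      obtain ⟨hm, hp⟩ := ih acc hl.tail hacc hsep'
      refine ⟨?_, hp⟩
      intro x
      rw [hm]
      constructor
      · rintro (ha | ht)
        · exact Or.inl ha
        · exact Or.inr (by simp [ht])
      · rintro (ha | ht)
        · exact Or.inl ha
        · rcases List.mem_cons.mp ht with rfl | ht'
          · exact Or.inl hdacc
          · exact Or.inr ht'

-- A's dedup fold: membership and nodup (generalized over the accumulator)
theorem mem_dedupFold (l acc : List String) (x : String) :
    x ∈ l.foldl (fun acc item => if item ∈ acc then acc else acc ++ [item]) acc ↔ x ∈ acc ∨ x ∈ l := by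
  induction l generalizing acc with
  | nil => simp
  | cons d t ih =>
    simp only [List.foldl_cons]
    split_ifs with h
    · rw [ih]
      constructor
      · rintro (ha | ht)
        · exact Or.inl ha
        · exact Or.inr (by simp [ht])
      · rintro (ha | ht)
        · exact Or.inl ha
        · rcases List.mem_cons.mp ht with rfl | ht'
          · exact Or.inl h
          · exact Or.inr ht'
    · rw [ih]; simp [or_assoc]

theorem nodup_dedupFold (l acc : List String) (hacc : acc.Nodup) :
    (l.foldl (fun acc item => if item ∈ acc then acc else acc ++ [item]) acc).Nodup := by
  induction l generalizing acc with
  | nil => exact hacc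
  | cons d t ih =>
    simp only [List.foldl_cons]
    split_ifs with h
    · exact ih acc hacc
    · refine ih _ ?_
      rw [List.nodup_append]
      refine ⟨hacc, List.nodup_singleton d, ?_⟩
      intro a ha b hb he
      rw [List.mem_singleton] at hb
      exact h ((he.trans hb) ▸ ha)

theorem foldl_append_eq_map (l : List String) (f : String → String) (acc : List String) :
    l.foldl (fun acc item => acc ++ [f item]) acc = acc ++ l.map f := by
  induction l generalizing acc with
  | nil => simp
  | cons d t ih => simp [ih]

-- ===== VERDICT (by name: the statement is the Claim_ definition above) =====
theorem getUniqueDate_spec : Claim_equal_getUniqueDate := by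
  intro fileList _
  unfold Spec_getUniqueDate getUniqueDate getUniqueDate_alt
  have htmp : fileList.foldl (fun acc item => acc ++ [PySem.Str.slice item (some 26) (some 36)]) []
      = fileList.map (fun item => PySem.Str.slice item (some 26) (some 36)) :=
    foldl_append_eq_map fileList _ []
  rw [htmp]
  set xs := fileList.map (fun item => PySem.Str.slice item (some 26) (some 36)) with hxs
  set dd := xs.foldl (fun acc item => if item ∈ acc then acc else acc ++ [item]) [] with hdd
  set s0 := PySem.List.sorted xs (fun x => x) false with hs0
  have hps : s0.Pairwise (· ≤ ·) := by
    have := PySem.List.sorted_pairwise xs (fun x => x)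
    simpa [hs0] using this
  obtain ⟨hmemc, hclt⟩ := collapse_fold_inv s0 [] hps (List.Pairwise.nil) (by simp)
  set c := s0.foldl (fun out d => if out = [] ∨ out.getLast? ≠ some d then out ++ [d] else out) [] with hc
  have hcnd : c.Nodup := hclt.imp ne_of_lt
  have hdnd : dd.Nodup := nodup_dedupFold xs [] List.nodup_nil
  have hmem : ∀ y, y ∈ c ↔ y ∈ dd := by
    intro y
    rw [hc, hmemc y, hdd, mem_dedupFold]
    simp [hs0, PySem.List.mem_sorted]
  have hperm : c.Perm dd := (List.perm_ext_iff_of_nodup hcnd hdnd).mpr hmem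
  show PySem.List.sorted dd (fun x => x) = c
  have hh := PySem.List.sorted_eq_of_perm_of_pairwise_lt dd c (fun x : String => x) hperm hclt
  exact hh
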